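-- pv_equiv track=rewrite | github.com/drowsy2762/baekjoon | Python/goorm/week6/normal/2607.py | difword
-- ===== SOURCE A (Python) =====
-- def difword(a, b):
--     cnt = 0
--     for i in range(len(a)):
--         for j in range(len(b)):
--             if a[i] == b[j]:
--                 cnt += 1
--                 break
--     return cnt
-- ===== SOURCE B (Python) =====
-- def difword(a, b):
--     common = set(a) & set(b)
--     return sum(a.count(ch) for ch in common)
-- ===== Notes on version B (the rewrite author's own statement) =====
-- stated objective: faster
-- what changed: Replaces the per-position quadratic scan of a with a break-loop over b by a set intersection of the distinct characters followed by one count pass over only the shared distinct characters.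
import Mathlib
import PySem

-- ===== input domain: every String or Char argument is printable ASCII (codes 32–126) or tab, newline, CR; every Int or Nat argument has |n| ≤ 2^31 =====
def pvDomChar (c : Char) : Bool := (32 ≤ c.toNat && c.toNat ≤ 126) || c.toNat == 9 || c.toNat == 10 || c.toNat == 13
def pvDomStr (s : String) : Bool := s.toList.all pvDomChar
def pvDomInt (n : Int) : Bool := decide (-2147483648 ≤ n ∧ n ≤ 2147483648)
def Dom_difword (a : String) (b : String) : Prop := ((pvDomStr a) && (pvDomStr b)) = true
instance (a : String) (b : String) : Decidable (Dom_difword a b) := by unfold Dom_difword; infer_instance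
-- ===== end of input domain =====

-- B replaces A's quadratic position-by-position scan by a set intersection plus one
-- count pass over the distinct shared characters (objective: faster; set membership replaces the inner scan of b).

-- ===== PORT A =====
-- inner 'for j in range(len(b)): if a[i] == b[j]: cnt += 1; break'
def difwordInner (c : Char) : List Char → Int → Int
  | [], cnt => cnt
  | x :: rest, cnt => if x == c then cnt + 1 else difwordInner c rest cnt

def difword (a : String) (b : String) : Int :=
  a.toList.foldl (fun cnt c => difwordInner c b.toList cnt) 0

-- ===== PORT B =====
-- common = set(a) & set(b); sum(a.count(ch) for ch in common)
-- (a.count(ch) on a 1-char string ch is exactly the character count in a; sum over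
-- the set is order-independent, so consuming the Set's list order is exact)
def difword_alt (a : String) (b : String) : Int :=
  let common : PySem.Set Char :=
    PySem.Set.inter (PySem.Set.ofList a.toList) (PySem.Set.ofList b.toList)
  (common.map (fun ch => (a.toList.count ch : Int))).sum

-- ===== PRECONDITION & SPEC =====
def Spec_difword (a : String) (b : String) (out : Int) : Prop := out = difword_alt a b
instance (a : String) (b : String) (out : Int) : Decidable (Spec_difword a b out) := by unfold Spec_difword; infer_instance

-- ===== CLAIM (what is proved, stated in full; the proofs are below) =====
def Claim_equal_difword : Prop := ∀ (a : String) (b : String), Dom_difword a b → Spec_difword a b (difword a b)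

-- ===== LEMMAS AND PROOFS =====

theorem difwordInner_eq (c : Char) (l : List Char) (cnt : Int) :
    difwordInner c l cnt = if l.contains c then cnt + 1 else cnt := by
  induction l with
  | nil => simp [difwordInner]
  | cons x rest ih =>
    simp only [difwordInner, List.contains_cons]
    by_cases h : x = c
    · simp [h]
    · have h1 : (x == c) = false := by simp [h]
      have h2 : (c == x) = false := by simp [Ne.symm h]
      simp [h1, h2, ih]

theorem difword_eq_countP (a b : String) :
    difword a b = (a.toList.countP (fun c => b.toList.contains c) : Int) := by
  unfold difword
  have key : ∀ (al : List Char) (cnt : Int),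
      al.foldl (fun cnt c => difwordInner c b.toList cnt) cnt
        = cnt + (al.countP (fun c => b.toList.contains c) : Int) := by
    intro al
    induction al with
    | nil => simp
    | cons x rest ih =>
      intro cnt
      rw [List.foldl_cons, difwordInner_eq, List.countP_cons, ih]
      by_cases h : b.toList.contains x
      · rw [if_pos h]; simp only [h, if_true]; push_cast; ring
      · rw [if_neg h]; simp only [h, Bool.false_eq_true, if_false, Nat.add_zero]
  simpa using key a.toList 0

theorem difword_alt_eq_countP (a b : String) :
    difword_alt a b = (a.toList.countP (fun c => b.toList.contains c) : Int) := by
  unfold difword_alt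
  set al := a.toList
  set p : Char → Bool := fun c => b.toList.contains c
  have hinter : PySem.Set.inter (PySem.Set.ofList al) (PySem.Set.ofList b.toList)
      = (PySem.Set.ofList al).filter (fun c => (PySem.Set.ofList b.toList).contains c) := rfl
  have hmemset : ∀ c : Char, (PySem.Set.ofList b.toList).contains c = p c := by
    intro c
    simp [p, List.contains_eq_mem, PySem.Set.mem_ofList]
  have hfilter : (PySem.Set.ofList al).filter (fun c => (PySem.Set.ofList b.toList).contains c)
      = (PySem.Set.ofList al).filter p := by
    apply List.filter_congr; intro c _; exact hmemset c
  rw [hinter, hfilter]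
  -- the filtered dedup list: nodup, membership = (∈ al ∧ p)
  have hnd : ((PySem.Set.ofList al).filter p).Nodup :=
    (PySem.Set.nodup_ofList al).filter p
  have hndM : ((al.dedup).filter p).Nodup := al.nodup_dedup.filter p
  have hfs : ((PySem.Set.ofList al).filter p).toFinset = ((al.dedup).filter p).toFinset := by
    ext c
    simp [PySem.Set.mem_ofList, List.mem_dedup]
  have h1 := List.sum_toFinset (l := (PySem.Set.ofList al).filter p)
      (fun c => (al.count c : Int)) hnd
  have h2 := List.sum_toFinset (l := (al.dedup).filter p)
      (fun c => (al.count c : Int)) hndM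
  have hsum : (((PySem.Set.ofList al).filter p).map (fun c => (al.count c : Int))).sum
      = (((al.dedup).filter p).map (fun c => (al.count c : Int))).sum := by
    rw [← h1, ← h2, hfs]
  rw [hsum]
  have := List.sum_map_count_dedup_filter_eq_countP p al
  calc (((al.dedup).filter p).map (fun c => (al.count c : Int))).sum
      = ((((al.dedup).filter p).map (fun c => al.count c)).sum : Int) := by
        induction ((al.dedup).filter p) with
        | nil => simp
        | cons y ys ihy => push_cast [List.map_cons, List.sum_cons, ihy]; rfl
    _ = (al.countP p : Int) := by rw [this]

-- ===== VERDICT (by name: the statement is the Claim_ definition above) =====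
theorem difword_spec : Claim_equal_difword := by
  intro a b _
  unfold Spec_difword
  rw [difword_eq_countP, difword_alt_eq_countP]
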